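-- pv_equiv track=rewrite | github.com/aayush2710/CP-CodeForces | 144C - Anagram Search.py | check
-- ===== SOURCE A (Python) =====
-- def check(s,p):
--
--     temp_s = ""
--     for i in range(len(s)):
--         if not(s[i] in p or s[i] == "?"):
--             temp_s +=s[i]
--         elif s[i] in p:
--             l = p.rfind(s[i])
--             p = p[:l] + p[l+1:]
--
--     if temp_s == "":
--         return True
--     else:
--         return False
-- ===== SOURCE B (Python) =====
-- def check(s, p):
--     need = sorted(c for c in s if c != '?')
--     pool = sorted(p)
--     j = 0
--     n = len(pool)
--     for c in need:
--         while j < n and pool[j] != c: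
--             j += 1
--         if j == n:
--             return False
--         j += 1
--     return True
-- ===== Notes on version B (the rewrite author's own statement) =====
-- stated objective: faster
-- what changed: A repeatedly rescans and rebuilds the pattern string (substring test plus rfind plus slicing per character); B filters '?' out of s, sorts both sequences once, and checks multiset containment with a single two-pointer merge.
import Mathlib
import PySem

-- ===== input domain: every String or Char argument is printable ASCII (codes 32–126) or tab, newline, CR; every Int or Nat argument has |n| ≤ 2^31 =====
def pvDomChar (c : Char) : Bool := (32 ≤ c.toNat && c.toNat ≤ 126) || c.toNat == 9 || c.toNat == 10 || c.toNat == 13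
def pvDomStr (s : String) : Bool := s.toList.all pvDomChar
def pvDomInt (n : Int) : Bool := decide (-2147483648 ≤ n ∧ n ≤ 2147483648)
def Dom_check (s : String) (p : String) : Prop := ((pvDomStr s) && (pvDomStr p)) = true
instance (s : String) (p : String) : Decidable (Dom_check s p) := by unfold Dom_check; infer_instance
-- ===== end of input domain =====

-- B replaces A's per-character rescan/rfind/slice of the shrinking pattern string by
-- filtering '?' out of s, sorting both sequences once and a single two-pointer merge.

-- ===== PORT A =====
-- A's loop over s: state (temp_s, p); substring test, rfind and slicing via PySem.
def checkLoop : List Char → List Char → List Char → List Char × List Char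
  | [], temp, p => (temp, p)
  | c :: rest, temp, p =>
    if !(PySem.Chars.isIn [c] p || c == '?') then
      checkLoop rest (temp ++ [c]) p
    else if PySem.Chars.isIn [c] p then
      let l := PySem.Chars.rfind p [c]
      checkLoop rest temp (PySem.List.slice p none (some l) ++ PySem.List.slice p (some (l + 1)) none)
    else
      checkLoop rest temp p

def check (s : String) (p : String) : Bool :=
  if (checkLoop s.toList [] p.toList).1 = [] then true else false

-- ===== PORT B =====
-- two-pointer merge over the two sorted lists (Source B's pointer loop as recursion)
def mergeChk : List Char → List Char → Bool
  | [], _ => true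
  | _ :: _, [] => false
  | a :: as, b :: bs => if a = b then mergeChk as bs else mergeChk (a :: as) bs
termination_by as bs => as.length + bs.length

def check_alt (s : String) (p : String) : Bool :=
  let need := PySem.List.sorted (s.toList.filter (fun c => c ≠ '?')) (fun x => x) false
  let pool := PySem.List.sorted p.toList (fun x => x) false
  mergeChk need pool

-- ===== PRECONDITION & SPEC =====
def Spec_check (s : String) (p : String) (out : Bool) : Prop := out = check_alt s p
instance (s : String) (p : String) (out : Bool) : Decidable (Spec_check s p out) := by unfold Spec_check; infer_instance

-- ===== CLAIM (what is proved, stated in full; the proofs are below) =====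
def Claim_equal_check : Prop := ∀ (s : String) (p : String), Dom_check s p → Spec_check s p (check s p)

-- ===== LEMMAS AND PROOFS =====

-- the common characterisation: every non-'?' character of cs occurs at least as often in p
def MSub (cs p : List Char) : Prop := ∀ c, c ≠ '?' → cs.count c ≤ p.count c

theorem singleton_prefix_iff (c : Char) (xs : List Char) :
    [c] <+: xs ↔ xs.head? = some c := by
  cases xs with
  | nil => simp
  | cons y ys =>
    constructor
    · rintro ⟨t, ht⟩
      simp only [List.singleton_append] at ht
      cases ht; simp
    · intro h
      simp only [List.head?_cons, Option.some.injEq] at h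
      exact ⟨ys, by simp [h]⟩

theorem isIn_singleton_iff (c : Char) (p : List Char) :
    PySem.Chars.isIn [c] p = true ↔ c ∈ p := by
  rw [PySem.Chars.isIn_iff_infix]
  constructor
  · intro h; exact h.subset (by simp)
  · intro h
    obtain ⟨n, hn, he⟩ := List.getElem_of_mem h
    refine List.IsPrefix.isInfix ?_ |>.trans (List.drop_suffix n p).isInfix
    rw [singleton_prefix_iff, List.head?_drop]
    simp [List.getElem?_eq_getElem hn, he]

theorem rfind_go_single (c : Char) (p : List Char) :
    ∀ j : Nat, (∃ i ≤ j, p[i]? = some c) →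
      ∃ n ≤ j, PySem.Chars.rfind.go p [c] j = (n : Int) ∧ p[n]? = some c := by
  intro j
  induction j with
  | zero =>
    rintro ⟨i, hi, hic⟩
    interval_cases i
    refine ⟨0, le_refl _, ?_, hic⟩
    have hpre : [c].isPrefixOf p = true := by
      rw [List.isPrefixOf_iff_prefix, singleton_prefix_iff, List.head?_eq_getElem?]
      exact hic
    simp [PySem.Chars.rfind.go, hpre]
  | succ j ih =>
    rintro ⟨i, hi, hic⟩
    by_cases hpre : [c].isPrefixOf (p.drop (j + 1)) = true
    · refine ⟨j + 1, le_refl _, ?_, ?_⟩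
      · simp [PySem.Chars.rfind.go, hpre]
      · rw [List.isPrefixOf_iff_prefix, singleton_prefix_iff, List.head?_drop] at hpre
        exact hpre
    · have hij : i ≤ j := by
        by_cases h : i = j + 1
        · exfalso; apply hpre
          rw [List.isPrefixOf_iff_prefix, singleton_prefix_iff, List.head?_drop, ← h]
          exact hic
        · omega
      obtain ⟨n, hn, hgo, hnc⟩ := ih ⟨i, hij, hic⟩
      refine ⟨n, Nat.le_succ_of_le hn, ?_, hnc⟩
      simp [PySem.Chars.rfind.go, hpre, hgo]

theorem rfind_single_spec (c : Char) (p : List Char) (h : c ∈ p) :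
    ∃ n : Nat, PySem.Chars.rfind p [c] = (n : Int) ∧ p[n]? = some c := by
  obtain ⟨m, hm, he⟩ := List.getElem_of_mem h
  obtain ⟨n, _, hgo, hnc⟩ := rfind_go_single c p p.length
    ⟨m, Nat.le_of_lt hm, by simp [List.getElem?_eq_getElem hm, he]⟩
  exact ⟨n, hgo, hnc⟩

-- the removal step of A: counts drop by one exactly at c
theorem count_remove (p : List Char) (n : Nat) (c : Char) (hnc : p[n]? = some c) (d : Char) :
    (p.take n ++ p.drop (n + 1)).count d + (if c = d then 1 else 0) = p.count d := by
  obtain ⟨hn, he⟩ := List.getElem?_eq_some_iff.mp hnc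
  have hsplit : p = p.take n ++ (c :: p.drop (n + 1)) := by
    conv_lhs => rw [← List.take_append_drop n p, List.drop_eq_getElem_cons hn, he]
  conv_rhs => rw [hsplit]
  rw [List.count_append, List.count_append, List.count_cons]
  simp only [beq_iff_eq]
  split_ifs <;> omega

theorem checkLoop_fst_eq_nil (cs : List Char) :
    ∀ temp p, (checkLoop cs temp p).1 = [] ↔ temp = [] ∧ MSub cs p := by
  induction cs with
  | nil => intro temp p; simp [checkLoop, MSub]
  | cons c rest ih =>
    intro temp p
    by_cases hin : PySem.Chars.isIn [c] p = true
    · -- c is found in p: its last occurrence is removed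
      have hmem : c ∈ p := (isIn_singleton_iff c p).mp hin
      obtain ⟨n, hr, hnc⟩ := rfind_single_spec c p hmem
      have hcnt := count_remove p n c hnc
      have hslice : PySem.List.slice p none (some ((n : Int))) ++
          PySem.List.slice p (some ((n : Int) + 1)) none = p.take n ++ p.drop (n + 1) := by
        rw [PySem.List.slice_to _ (by positivity)]
        rw [show ((n : Int) + 1) = ((n + 1 : Nat) : Int) by push_cast; ring]
        rw [PySem.List.slice_from _ (by positivity)]
        simp
      rw [show checkLoop (c :: rest) temp p = checkLoop rest temp
            (PySem.List.slice p none (some (PySem.Chars.rfind p [c])) ++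
             PySem.List.slice p (some (PySem.Chars.rfind p [c] + 1)) none) by
        simp [checkLoop, hin]]
      rw [hr, hslice, ih]
      have key : MSub rest (p.take n ++ p.drop (n + 1)) ↔ MSub (c :: rest) p := by
        constructor
        · intro hm d hd
          have h1 := hm d hd
          have h2 := hcnt d
          rw [List.count_cons]
          simp only [beq_iff_eq]
          split_ifs at h2 ⊢ <;> omega
        · intro hm d hd
          have h1 := hm d hd
          have h2 := hcnt d
          rw [List.count_cons] at h1
          simp only [beq_iff_eq] at h1
          split_ifs at h1 h2 <;> omega
      rw [key]
    · by_cases hq : c = '?'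
      · -- '?' not present in p: skipped entirely
        subst hq
        rw [show checkLoop ('?' :: rest) temp p = checkLoop rest temp p by
          simp [checkLoop, hin]]
        rw [ih]
        have key : MSub rest p ↔ MSub ('?' :: rest) p := by
          constructor
          · intro hm d hd
            have hne : ¬ '?' = d := fun h => hd h.symm
            rw [List.count_cons]
            simp [hne]
            exact hm d hd
          · intro hm d hd
            have hne : ¬ '?' = d := fun h => hd h.symm
            have := hm d hd
            rw [List.count_cons] at this
            simpa [hne] using this
        rw [key]
      · -- failure character: appended to temp, result can never be empty
        rw [show checkLoop (c :: rest) temp p = checkLoop rest (temp ++ [c]) p by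
          simp [checkLoop, hin, hq]]
        rw [ih]
        constructor
        · rintro ⟨ht, _⟩; exact absurd ht (by simp)
        · rintro ⟨_, hm⟩
          exfalso
          have := hm c hq
          have hc0 : p.count c = 0 := by
            rw [List.count_eq_zero]
            exact fun h => hin ((isIn_singleton_iff c p).mpr h)
          rw [List.count_cons_self, hc0] at this
          omega

theorem check_iff (s p : String) :
    check s p = true ↔ MSub s.toList p.toList := by
  have h := checkLoop_fst_eq_nil s.toList [] p.toList
  unfold check
  by_cases he : (checkLoop s.toList [] p.toList).1 = []
  · rw [if_pos he]
    exact iff_of_true rfl (h.mp he).2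
  · rw [if_neg he]
    constructor
    · intro hf; exact Bool.noConfusion hf
    · intro hm; exact absurd (h.mpr ⟨rfl, hm⟩) he

-- merge on sorted lists decides multiset containment
theorem mergeChk_iff : ∀ (bs as : List Char),
    as.Pairwise (· ≤ ·) → bs.Pairwise (· ≤ ·) →
    (mergeChk as bs = true ↔ ∀ c, as.count c ≤ bs.count c) := by
  intro bs
  induction bs with
  | nil =>
    intro as _ _
    cases as with
    | nil => simp [mergeChk]
    | cons a as =>
      simp only [mergeChk]
      constructor
      · intro h; exact Bool.noConfusion h
      · intro h
        have := h a
        simp [List.count_cons_self] at this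
  | cons b bs ih =>
    intro as has hbs
    cases as with
    | nil => simp [mergeChk]
    | cons a as =>
      by_cases hab : a = b
      · subst hab
        rw [show mergeChk (a :: as) (a :: bs) = mergeChk as bs by simp [mergeChk]]
        rw [ih as has.of_cons hbs.of_cons]
        constructor
        · intro h c
          have hcc := h c
          simp only [List.count_cons, beq_iff_eq]
          split_ifs <;> omega
        · intro h c
          have hcc := h c
          simp only [List.count_cons, beq_iff_eq] at hcc
          split_ifs at hcc <;> omega
      · rw [show mergeChk (a :: as) (b :: bs) = mergeChk (a :: as) bs by simp [mergeChk, hab]]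
        rw [ih (a :: as) has hbs.of_cons]
        constructor
        · intro h c
          have hcc := h c
          simp only [List.count_cons, beq_iff_eq] at hcc ⊢
          split_ifs at hcc ⊢ <;> omega
        · intro h c
          rcases lt_or_gt_of_ne hab with hlt | hgt
          · -- a < b: a occurs in a :: as but not in b :: bs, contradiction
            exfalso
            have ha := h a
            have hca : (b :: bs).count a = 0 := by
              rw [List.count_eq_zero]
              intro hmema
              rcases List.mem_cons.mp hmema with h' | h'
              · exact (ne_of_lt hlt) h'
              · exact absurd (List.rel_of_pairwise_cons hbs h') (not_le.mpr hlt)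
            rw [hca, List.count_cons_self] at ha
            omega
          · -- b < a: b occurs nowhere in a :: as, so dropping it is harmless
            have hcb : (a :: as).count b = 0 := by
              rw [List.count_eq_zero]
              intro hmemb
              rcases List.mem_cons.mp hmemb with h' | h'
              · exact (ne_of_lt hgt) h'
              · exact absurd (List.rel_of_pairwise_cons has h') (not_le.mpr hgt)
            by_cases hcb' : c = b
            · subst hcb'; rw [hcb]; exact Nat.zero_le _
            · have hbc : (b == c) = false := beq_eq_false_iff_ne.mpr (fun h' => hcb' h'.symm)
              calc List.count c (a :: as) ≤ List.count c (b :: bs) := h c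
                _ = List.count c bs := by rw [List.count_cons, hbc]; simp

-- the '?'-filter in counts
theorem count_filter_qm (l : List Char) (c : Char) :
    (l.filter (fun x => x ≠ '?')).count c = if c = '?' then 0 else l.count c := by
  by_cases hc : c = '?'
  · rw [if_pos hc, List.count_eq_zero]
    intro h
    have := List.of_mem_filter h
    simp [hc] at this
  · rw [if_neg hc]
    exact List.count_filter (by simp [hc])

theorem check_alt_iff (s p : String) :
    check_alt s p = true ↔ MSub s.toList p.toList := by
  show mergeChk (PySem.List.sorted (s.toList.filter (fun c => c ≠ '?')) (fun x => x) false)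
        (PySem.List.sorted p.toList (fun x => x) false) = true ↔ _
  rw [mergeChk_iff _ _ (PySem.List.sorted_pairwise _ _) (PySem.List.sorted_pairwise _ _)]
  have hperm1 := PySem.List.sorted_perm (s.toList.filter (fun c => c ≠ '?')) (fun x : Char => x) false
  have hperm2 := PySem.List.sorted_perm p.toList (fun x : Char => x) false
  constructor
  · intro h c hc
    have := h c
    rw [hperm1.count_eq, hperm2.count_eq, count_filter_qm, if_neg hc] at this
    exact this
  · intro h c
    rw [hperm1.count_eq, hperm2.count_eq, count_filter_qm]
    by_cases hc : c = '?'
    · simp [hc]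
    · rw [if_neg hc]; exact h c hc

-- ===== VERDICT (by name: the statement is the Claim_ definition above) =====
theorem check_spec : Claim_equal_check := by
  intro s p _
  unfold Spec_check
  have ha := check_iff s p
  have hb := check_alt_iff s p
  cases h1 : check s p <;> cases h2 : check_alt s p <;> simp_all
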